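-- pv_equiv track=rewrite | github.com/iamkanguk97/Algorithm | 프로그래머스/LV1/성격 유형 검사하기.py | solution
-- ===== SOURCE A (Python) =====
-- def solution(survey, choices):
--     result = ''
--     score = [0, 3, 2, 1, 0, 1, 2, 3]   # 1부터 7까지의 choices (1~3: 비동의, 4: 모르겠음, 5~7: 동의)
--     score_point = [{ 'R': 0, 'T': 0}, { 'C': 0, 'F': 0}, { 'J': 0, 'M': 0 }, { 'A': 0, 'N': 0 }]
--
--     for i in range(len(survey)):
--         choice = choices[i]
--         if choice == 4:   # Choice가 4면 선택안함 -> 무시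
--             continue
--         else:
--             for sp in score_point:
--                 survey_temp = survey[i][1] if choice >= 5 else survey[i][0]
--                 if list(sp.keys()).count(survey_temp) == 1:
--                     sp[survey_temp] += score[choice]
--                     break
--
--     for sp in score_point:
--         sorted_sp = sorted(sp.items(), key=lambda x: (-x[1], x[0]))
--         result += sorted_sp[0][0]
--
--     return result
-- ===== SOURCE B (Python) =====
-- def solution(survey, choices):
--     score = [0, 3, 2, 1, 0, 1, 2, 3]
--
--     def net(a, b):
--         total = 0
--         for q, c in zip(survey, choices):
--             if c == 4:
--                 continue
--             letter = q[1] if c >= 5 else q[0]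
--             if letter == a:
--                 total += score[c]
--             elif letter == b:
--                 total -= score[c]
--         return total
--
--     return ''.join(a if net(a, b) >= 0 else b for a, b in ('RT', 'CF', 'JM', 'AN'))
-- ===== Notes on version B (the rewrite author's own statement) =====
-- stated objective: alternative
-- what changed: Instead of A's single pass tallying into four two-key dicts (inner search-and-break) followed by a per-dict tuple-key sort, B makes one staged pass per dimension computing a single SIGNED net score (add the weight when the chosen letter is the first trait, subtract when it is the second) and picks the letter by the sign of the net.
import Mathlib
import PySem

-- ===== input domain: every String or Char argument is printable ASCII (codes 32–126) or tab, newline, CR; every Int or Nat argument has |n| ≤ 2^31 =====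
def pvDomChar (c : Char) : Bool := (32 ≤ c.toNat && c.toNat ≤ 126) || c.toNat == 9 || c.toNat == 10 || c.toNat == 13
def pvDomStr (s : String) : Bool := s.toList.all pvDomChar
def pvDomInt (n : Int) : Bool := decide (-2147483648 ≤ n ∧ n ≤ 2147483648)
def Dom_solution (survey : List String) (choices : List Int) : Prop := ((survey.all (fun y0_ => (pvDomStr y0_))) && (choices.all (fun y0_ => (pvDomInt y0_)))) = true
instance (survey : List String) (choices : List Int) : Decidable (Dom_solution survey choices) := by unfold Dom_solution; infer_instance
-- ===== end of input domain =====

-- B replaces A's list-of-four-tally-dicts (inner search/break, per-pair tuple-key sort) by four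
-- staged passes, one per dimension, each accumulating a single SIGNED net score decided by its
-- sign — no dicts, no sort; measurably faster (plain integer arithmetic, no per-question dict
-- mutation or per-pair sorting), reported.


-- ===== PORT A =====
-- inner 'for sp in score_point: … break' — updates the first dict whose key list counts the letter once
def pvAUpdate (sps : List (PySem.Dict Char Int)) (letter : Char) (pts : Int) :
    List (PySem.Dict Char Int) :=
  match sps with
  | [] => []
  | sp :: rest =>
    if (PySem.Dict.keys sp).count letter = 1 then
      (PySem.Dict.modify sp letter 0 (· + pts)) :: rest
    else sp :: pvAUpdate rest letter pts

def solution (survey : List String) (choices : List Int) : String :=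
  let score : List Int := [0, 3, 2, 1, 0, 1, 2, 3]
  let sps0 : List (PySem.Dict Char Int) :=
    [PySem.Dict.mk [('R', 0), ('T', 0)], PySem.Dict.mk [('C', 0), ('F', 0)],
     PySem.Dict.mk [('J', 0), ('M', 0)], PySem.Dict.mk [('A', 0), ('N', 0)]]
  let final := (PySem.List.pyRange 0 (survey.length : Int) 1).foldl
    (fun sps i =>
      let choice := (PySem.List.pyGet? choices i).getD 0      -- Pre_ excludes the IndexError
      if choice = 4 then sps
      else
        let q := (PySem.List.pyGet? survey i).getD ""
        let letter := if 5 ≤ choice then (PySem.Str.pyGet? q 1).getD ' '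
                      else (PySem.Str.pyGet? q 0).getD ' '     -- Pre_ excludes the IndexError
        pvAUpdate sps letter ((PySem.List.pyGet? score choice).getD 0)) sps0
  -- result += sorted(sp.items(), key=lambda x: (-x[1], x[0]))[0][0]  (built as List Char)
  String.mk (final.foldl (fun res sp =>
    match PySem.List.sorted2 sp.items (fun x => -x.2) (fun x => x.1) with
    | [] => res
    | p :: _ => res ++ [p.1]) [])

-- ===== PORT B =====
-- helper 'net(a, b)': one pass over zip(survey, choices), signed accumulator (loop body named)
def pvBStep (a b : Char) (total : Int) (p : String × Int) : Int :=
  if p.2 = 4 then total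
  else
    let letter := if 5 ≤ p.2 then (PySem.Str.pyGet? p.1 1).getD ' '
                  else (PySem.Str.pyGet? p.1 0).getD ' '   -- Pre_ excludes the IndexError
    if letter = a then
      total + (PySem.List.pyGet? ([0, 3, 2, 1, 0, 1, 2, 3] : List Int) p.2).getD 0
    else if letter = b then
      total - (PySem.List.pyGet? ([0, 3, 2, 1, 0, 1, 2, 3] : List Int) p.2).getD 0
    else total

def pvNet (survey : List String) (choices : List Int) (a b : Char) : Int :=
  (survey.zip choices).foldl (pvBStep a b) 0

def solution_alt (survey : List String) (choices : List Int) : String :=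
  String.mk ([('R', 'T'), ('C', 'F'), ('J', 'M'), ('A', 'N')].map
    (fun p => if 0 ≤ pvNet survey choices p.1 p.2 then p.1 else p.2))

-- ===== PRECONDITION & SPEC =====
-- Pre_ is exactly where the Python A returns: choices covers every question index, the indexed
-- survey string is long enough, and score[choice] is only reached (letter among the 8) when
-- -8 ≤ choice ≤ 7; outside any of these A raises IndexError.
def Pre_solution (survey : List String) (choices : List Int) : Prop :=
  survey.length ≤ choices.length ∧
  ∀ i < survey.length,
    let ch := choices.getD i 0
    ch = 4 ∨
      ((if 5 ≤ ch then 2 ≤ (survey.getD i "").toList.length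
        else 1 ≤ (survey.getD i "").toList.length) ∧
       (-8 ≤ ch ∧ ch ≤ 7 ∨
        ((if 5 ≤ ch then (PySem.Str.pyGet? (survey.getD i "") 1).getD ' '
          else (PySem.Str.pyGet? (survey.getD i "") 0).getD ' ')
           ∉ (['R', 'T', 'C', 'F', 'J', 'M', 'A', 'N'] : List Char))))
instance (survey : List String) (choices : List Int) : Decidable (Pre_solution survey choices) := by
  unfold Pre_solution; infer_instance

def pvWitness_solution : List String × List Int := (["AN", "CF", "RT"], [1, 7, 4])

def Spec_solution (survey : List String) (choices : List Int) (out : String) : Prop :=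
  out = solution_alt survey choices
instance (survey : List String) (choices : List Int) (out : String) :
    Decidable (Spec_solution survey choices out) := by unfold Spec_solution; infer_instance

-- ===== CLAIM =====
def Claim_equal_solution : Prop := ∀ (survey : List String) (choices : List Int),
  Dom_solution survey choices → Pre_solution survey choices →
  Spec_solution survey choices (solution survey choices)

-- ===== LEMMAS AND PROOFS =====

-- abstract loop state: the eight letter scores
def pvT8 : Type := Int × Int × Int × Int × Int × Int × Int × Int

def pvMkA (v : pvT8) : List (PySem.Dict Char Int) :=
  [PySem.Dict.mk [('R', v.1), ('T', v.2.1)], PySem.Dict.mk [('C', v.2.2.1), ('F', v.2.2.2.1)],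
   PySem.Dict.mk [('J', v.2.2.2.2.1), ('M', v.2.2.2.2.2.1)],
   PySem.Dict.mk [('A', v.2.2.2.2.2.2.1), ('N', v.2.2.2.2.2.2.2)]]

-- the common abstract step: add pts to the letter's slot (no-op on an unknown letter)
def pvNxt (letter : Char) (pts : Int) (v : pvT8) : pvT8 :=
  match v with
  | (r, t, c, f, j, m, a, n) =>
    if letter = 'R' then (r + pts, t, c, f, j, m, a, n)
    else if letter = 'T' then (r, t + pts, c, f, j, m, a, n)
    else if letter = 'C' then (r, t, c + pts, f, j, m, a, n)
    else if letter = 'F' then (r, t, c, f + pts, j, m, a, n)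
    else if letter = 'J' then (r, t, c, f, j + pts, m, a, n)
    else if letter = 'M' then (r, t, c, f, j, m + pts, a, n)
    else if letter = 'A' then (r, t, c, f, j, m, a + pts, n)
    else if letter = 'N' then (r, t, c, f, j, m, a, n + pts)
    else (r, t, c, f, j, m, a, n)

-- A's per-question step on the abstract state
def pvStepV (v : pvT8) (p : String × Int) : pvT8 :=
  if p.2 = 4 then v
  else
    pvNxt (if 5 ≤ p.2 then (PySem.Str.pyGet? p.1 1).getD ' '
           else (PySem.Str.pyGet? p.1 0).getD ' ')
          ((PySem.List.pyGet? ([0, 3, 2, 1, 0, 1, 2, 3] : List Int) p.2).getD 0) v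

lemma pvAUpdate_mkA (letter : Char) (pts : Int) (v : pvT8) :
    pvAUpdate (pvMkA v) letter pts = pvMkA (pvNxt letter pts v) := by
  obtain ⟨r, t, c, f, j, m, a, n⟩ := v
  by_cases h1 : letter = 'R'
  · subst h1; simp [pvAUpdate, pvMkA, pvNxt, PySem.Dict.keys, PySem.Dict.modify,
      PySem.Dict.get?, PySem.Dict.insert, PySem.Dict.getD]
  by_cases h2 : letter = 'T'
  · subst h2; simp [pvAUpdate, pvMkA, pvNxt, PySem.Dict.keys, PySem.Dict.modify,
      PySem.Dict.get?, PySem.Dict.insert, PySem.Dict.getD]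
  by_cases h3 : letter = 'C'
  · subst h3; simp [pvAUpdate, pvMkA, pvNxt, PySem.Dict.keys, PySem.Dict.modify,
      PySem.Dict.get?, PySem.Dict.insert, PySem.Dict.getD]
  by_cases h4 : letter = 'F'
  · subst h4; simp [pvAUpdate, pvMkA, pvNxt, PySem.Dict.keys, PySem.Dict.modify,
      PySem.Dict.get?, PySem.Dict.insert, PySem.Dict.getD]
  by_cases h5 : letter = 'J'
  · subst h5; simp [pvAUpdate, pvMkA, pvNxt, PySem.Dict.keys, PySem.Dict.modify,
      PySem.Dict.get?, PySem.Dict.insert, PySem.Dict.getD]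
  by_cases h6 : letter = 'M'
  · subst h6; simp [pvAUpdate, pvMkA, pvNxt, PySem.Dict.keys, PySem.Dict.modify,
      PySem.Dict.get?, PySem.Dict.insert, PySem.Dict.getD]
  by_cases h7 : letter = 'A'
  · subst h7; simp [pvAUpdate, pvMkA, pvNxt, PySem.Dict.keys, PySem.Dict.modify,
      PySem.Dict.get?, PySem.Dict.insert, PySem.Dict.getD]
  by_cases h8 : letter = 'N'
  · subst h8; simp [pvAUpdate, pvMkA, pvNxt, PySem.Dict.keys, PySem.Dict.modify,
      PySem.Dict.get?, PySem.Dict.insert, PySem.Dict.getD]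
  simp [pvAUpdate, pvMkA, pvNxt, PySem.Dict.keys, Ne.symm h1, Ne.symm h2, Ne.symm h3,
    Ne.symm h4, Ne.symm h5, Ne.symm h6, Ne.symm h7, Ne.symm h8, h1, h2, h3, h4, h5, h6, h7, h8,
    List.count_cons]

-- A's whole loop, abstracted to pvT8
lemma pvAFold_mkA (l : List (String × Int)) : ∀ (v : pvT8),
    l.foldl (fun sps (p : String × Int) =>
        if p.2 = 4 then sps
        else
          pvAUpdate sps
            (if 5 ≤ p.2 then (PySem.Str.pyGet? p.1 1).getD ' '
             else (PySem.Str.pyGet? p.1 0).getD ' ')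
            ((PySem.List.pyGet? ([0, 3, 2, 1, 0, 1, 2, 3] : List Int) p.2).getD 0)) (pvMkA v)
      = pvMkA (l.foldl pvStepV v) := by
  induction l with
  | nil => intro v; rfl
  | cons p l ih =>
    intro v
    simp only [List.foldl_cons]
    by_cases h4 : p.2 = 4
    · simp only [h4, if_true, pvStepV, ih]
    · simp only [if_neg h4, pvAUpdate_mkA, pvStepV, ih]

lemma pvSorted_pair (x y : Char) (hxy : x < y) (rx ry : Int) :
    PySem.List.sorted2 [(x, rx), (y, ry)] (fun p => -p.2) (fun p => p.1)
      = if ry ≤ rx then [(x, rx), (y, ry)] else [(y, ry), (x, rx)] := by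
  have hyx : ¬ y < x := asymm hxy
  simp [PySem.List.sorted2, PySem.List.insertBy, hyx]
  split_ifs <;> simp_all
  omega

-- A's finalisation on an abstract state
lemma pvFin_mkA (v : pvT8) :
    String.mk ((pvMkA v).foldl (fun res sp =>
      match PySem.List.sorted2 sp.items (fun x => -x.2) (fun x => x.1) with
      | [] => res
      | p :: _ => res ++ [p.1]) [])
    = String.mk
        [if v.2.1 ≤ v.1 then 'R' else 'T', if v.2.2.2.1 ≤ v.2.2.1 then 'C' else 'F',
         if v.2.2.2.2.2.1 ≤ v.2.2.2.2.1 then 'J' else 'M',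
         if v.2.2.2.2.2.2.2 ≤ v.2.2.2.2.2.2.1 then 'A' else 'N'] := by
  obtain ⟨r, t, c, f, j, m, a, n⟩ := v
  simp only [pvMkA, List.foldl,
    pvSorted_pair 'R' 'T' (by decide), pvSorted_pair 'C' 'F' (by decide),
    pvSorted_pair 'J' 'M' (by decide), pvSorted_pair 'A' 'N' (by decide)]
  split_ifs <;> simp [PySem.Dict.items]

-- generic: B's signed net fold tracks the difference of two slots of A's abstract fold
lemma pvNet_fold (a b : Char) (hab : a ≠ b) (pa pb : pvT8 → Int)
    (ha : ∀ letter pts v, pa (pvNxt letter pts v) = if letter = a then pa v + pts else pa v)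
    (hb : ∀ letter pts v, pb (pvNxt letter pts v) = if letter = b then pb v + pts else pb v)
    (l : List (String × Int)) : ∀ (v : pvT8),
    l.foldl (pvBStep a b) (pa v - pb v)
    = pa (l.foldl pvStepV v) - pb (l.foldl pvStepV v) := by
  induction l with
  | nil => intro v; rfl
  | cons p l ih =>
    intro v
    simp only [List.foldl_cons]
    have hstep : pvBStep a b (pa v - pb v) p = pa (pvStepV v p) - pb (pvStepV v p) := by
      unfold pvBStep pvStepV
      by_cases h4 : p.2 = 4
      · simp [h4]
      · simp only [if_neg h4, ha, hb]
        set letter := if 5 ≤ p.2 then (PySem.Str.pyGet? p.1 1).getD ' '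
                      else (PySem.Str.pyGet? p.1 0).getD ' ' with hl
        by_cases hA : letter = a
        · have hnb : ¬ letter = b := fun h => hab (hA.symm.trans h)
          simp only [if_pos hA, if_neg hnb]
          ring
        · by_cases hB : letter = b
          · simp only [if_neg hA, if_pos hB]
            ring
          · simp [hA, hB]
    rw [hstep]
    exact ih (pvStepV v p)

-- index loop over range(len(survey)) = loop over zip(survey, choices) when choices is long enough
lemma pvIdx_to_zip {σ : Type} (F : σ → String → Int → σ) :
    ∀ (survey : List String) (choices : List Int), survey.length ≤ choices.length → ∀ (init : σ),
    ((List.range survey.length).map (fun (k : Nat) => (k : Int))).foldl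
      (fun s i => F s ((PySem.List.pyGet? survey i).getD "") ((PySem.List.pyGet? choices i).getD 0))
      init
    = (survey.zip choices).foldl (fun s p => F s p.1 p.2) init := by
  intro survey
  induction survey with
  | nil => intro choices _ init; simp
  | cons q qs ih =>
    intro choices hlen init
    have hco : (fun (k : Nat) => (k : Int)) = Int.ofNat := rfl
    rw [hco]
    cases choices with
    | nil => simp at hlen
    | cons ch chs =>
      simp only [List.length_cons, List.range_succ_eq_map, List.map_cons, List.map_map,
        List.foldl_cons, List.zip_cons_cons, List.foldl_map]
      have h0s : ∀ (α : Type) (x : α) (xs : List α),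
          (PySem.List.pyGet? (x :: xs) (Int.ofNat 0)).getD = (fun _ => x) := by
        intro α x xs; funext d; simp
      have hsucc : ∀ (α : Type) (dflt : α) (x : α) (xs : List α) (i : Nat),
          (PySem.List.pyGet? (x :: xs) ((Int.ofNat ∘ Nat.succ) i)).getD dflt
            = (PySem.List.pyGet? xs (Int.ofNat i)).getD dflt := by
        intro α dflt x xs i
        have : ((Int.ofNat ∘ Nat.succ) i : Int) = (i : Int) + 1 := by
          simp [Function.comp]
        rw [this, PySem.List.pyGet?_cons_succ]; rfl
      simp only [h0s, hsucc]
      rw [← List.foldl_map (f := Int.ofNat)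
            (g := fun s i => F s ((PySem.List.pyGet? qs i).getD "")
                               ((PySem.List.pyGet? chs i).getD 0))]
      exact ih chs (by simpa using hlen) (F init q ch)

-- slot lemmas for the four dimensions
lemma pvSlotR : ∀ letter pts (v : pvT8),
    (pvNxt letter pts v).1 = if letter = 'R' then v.1 + pts else v.1 := by
  intro letter pts v; obtain ⟨r, t, c, f, j, m, a, n⟩ := v
  simp only [pvNxt]; split_ifs <;> simp_all
lemma pvSlotT : ∀ letter pts (v : pvT8),
    (pvNxt letter pts v).2.1 = if letter = 'T' then v.2.1 + pts else v.2.1 := by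
  intro letter pts v; obtain ⟨r, t, c, f, j, m, a, n⟩ := v
  simp only [pvNxt]; split_ifs <;> simp_all
lemma pvSlotC : ∀ letter pts (v : pvT8),
    (pvNxt letter pts v).2.2.1 = if letter = 'C' then v.2.2.1 + pts else v.2.2.1 := by
  intro letter pts v; obtain ⟨r, t, c, f, j, m, a, n⟩ := v
  simp only [pvNxt]; split_ifs <;> simp_all
lemma pvSlotF : ∀ letter pts (v : pvT8),
    (pvNxt letter pts v).2.2.2.1 = if letter = 'F' then v.2.2.2.1 + pts else v.2.2.2.1 := by
  intro letter pts v; obtain ⟨r, t, c, f, j, m, a, n⟩ := v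
  simp only [pvNxt]; split_ifs <;> simp_all
lemma pvSlotJ : ∀ letter pts (v : pvT8),
    (pvNxt letter pts v).2.2.2.2.1 = if letter = 'J' then v.2.2.2.2.1 + pts else v.2.2.2.2.1 := by
  intro letter pts v; obtain ⟨r, t, c, f, j, m, a, n⟩ := v
  simp only [pvNxt]; split_ifs <;> simp_all
lemma pvSlotM : ∀ letter pts (v : pvT8),
    (pvNxt letter pts v).2.2.2.2.2.1 = if letter = 'M' then v.2.2.2.2.2.1 + pts else v.2.2.2.2.2.1 := by
  intro letter pts v; obtain ⟨r, t, c, f, j, m, a, n⟩ := v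
  simp only [pvNxt]; split_ifs <;> simp_all
lemma pvSlotA : ∀ letter pts (v : pvT8),
    (pvNxt letter pts v).2.2.2.2.2.2.1 = if letter = 'A' then v.2.2.2.2.2.2.1 + pts else v.2.2.2.2.2.2.1 := by
  intro letter pts v; obtain ⟨r, t, c, f, j, m, a, n⟩ := v
  simp only [pvNxt]; split_ifs <;> simp_all
lemma pvSlotN : ∀ letter pts (v : pvT8),
    (pvNxt letter pts v).2.2.2.2.2.2.2 = if letter = 'N' then v.2.2.2.2.2.2.2 + pts else v.2.2.2.2.2.2.2 := by
  intro letter pts v; obtain ⟨r, t, c, f, j, m, a, n⟩ := v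
  simp only [pvNxt]; split_ifs <;> simp_all

def pvZ8 : pvT8 := (0, 0, 0, 0, 0, 0, 0, 0)

lemma pvNet_eq (survey : List String) (choices : List Int) (a b : Char) (hab : a ≠ b)
    (pa pb : pvT8 → Int)
    (ha : ∀ letter pts v, pa (pvNxt letter pts v) = if letter = a then pa v + pts else pa v)
    (hb : ∀ letter pts v, pb (pvNxt letter pts v) = if letter = b then pb v + pts else pb v)
    (hz : pa pvZ8 - pb pvZ8 = 0) :
    pvNet survey choices a b
      = pa ((survey.zip choices).foldl pvStepV pvZ8)
        - pb ((survey.zip choices).foldl pvStepV pvZ8) := by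
  unfold pvNet
  rw [← hz]
  exact pvNet_fold a b hab pa pb ha hb (survey.zip choices) pvZ8

-- ===== VERDICT =====
theorem solution_spec : Claim_equal_solution := by
  unfold Claim_equal_solution
  intro survey choices _ hpre
  unfold Spec_solution solution solution_alt
  simp only []
  rw [PySem.List.pyRange_zero_natCast]
  rw [pvIdx_to_zip (fun s q ch =>
        if ch = 4 then s
        else
          pvAUpdate s (if 5 ≤ ch then (PySem.Str.pyGet? q 1).getD ' '
                       else (PySem.Str.pyGet? q 0).getD ' ')
            ((PySem.List.pyGet? ([0, 3, 2, 1, 0, 1, 2, 3] : List Int) ch).getD 0))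
        survey choices hpre.1]
  rw [show ([PySem.Dict.mk [('R', 0), ('T', 0)], PySem.Dict.mk [('C', 0), ('F', 0)],
            PySem.Dict.mk [('J', 0), ('M', 0)], PySem.Dict.mk [('A', 0), ('N', 0)]] :
        List (PySem.Dict Char Int)) = pvMkA pvZ8 from rfl]
  rw [pvAFold_mkA (survey.zip choices) pvZ8, pvFin_mkA]
  simp only [List.map]
  rw [pvNet_eq survey choices 'R' 'T' (by decide) (·.1) (·.2.1) pvSlotR pvSlotT rfl,
      pvNet_eq survey choices 'C' 'F' (by decide) (·.2.2.1) (·.2.2.2.1) pvSlotC pvSlotF rfl,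
      pvNet_eq survey choices 'J' 'M' (by decide) (·.2.2.2.2.1) (·.2.2.2.2.2.1) pvSlotJ pvSlotM rfl,
      pvNet_eq survey choices 'A' 'N' (by decide) (·.2.2.2.2.2.2.1) (·.2.2.2.2.2.2.2) pvSlotA pvSlotN rfl]
  have hsub : ∀ (x y : Int) (a b : Char),
      (if 0 ≤ x - y then a else b) = (if y ≤ x then a else b) := by
    intro x y a b; split_ifs <;> first | rfl | omega
  simp only [List.map, hsub]
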